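-- pv_equiv track=rewrite | github.com/ilzxc/thirst | code/sketches/thoughts_pitches.py | findPitches
-- ===== SOURCE A (Python) =====
-- def findIndices(target, coll):
-- 	result = []
-- 	for index, value in enumerate(coll):
-- 		if value == target:
-- 			result.append(index)
-- 	return result
--
-- def findPitches(pitch, coll):
-- 	diffs = []
-- 	for note in coll:
-- 		diffs.append(pitch - note)
-- 	absdiffs = []
-- 	for diff in diffs:
-- 		absdiffs.append(abs(diff))
-- 	mindiff = min(absdiffs)
-- 	return findIndices(mindiff, absdiffs)
-- ===== SOURCE B (Python) =====
-- def findPitches(pitch, coll):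
--     best = None
--     result = []
--     for index, note in enumerate(coll):
--         d = abs(pitch - note)
--         if best is None or d < best:
--             best = d
--             result = [index]
--         elif d == best:
--             result.append(index)
--     if best is None:
--         raise ValueError("findPitches: empty collection")
--     return result
-- ===== Notes on version B (the rewrite author's own statement) =====
-- stated objective: simpler
-- what changed: Replaced A's three passes (build diffs list, build absdiffs list, min, then scan for matching indices) by a single pass over enumerate(coll) keeping the running best distance and the index list, resetting the list when a strictly smaller distance appears.
import Mathlib
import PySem

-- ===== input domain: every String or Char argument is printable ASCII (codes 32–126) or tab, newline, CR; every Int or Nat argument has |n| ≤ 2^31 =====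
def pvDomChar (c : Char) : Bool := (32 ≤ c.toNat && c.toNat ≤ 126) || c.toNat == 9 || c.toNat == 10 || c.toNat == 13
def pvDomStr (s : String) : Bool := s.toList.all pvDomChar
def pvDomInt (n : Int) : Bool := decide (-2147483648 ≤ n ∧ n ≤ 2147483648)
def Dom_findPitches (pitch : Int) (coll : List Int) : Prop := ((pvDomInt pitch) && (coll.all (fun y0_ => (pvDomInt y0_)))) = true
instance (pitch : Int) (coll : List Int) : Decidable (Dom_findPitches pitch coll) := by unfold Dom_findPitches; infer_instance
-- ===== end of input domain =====

-- B replaces A's three passes (diffs list, absdiffs list, min + index scan) by one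
-- pass keeping the running best distance and the index list (objective: simpler).


-- ===== PORT A =====
def findIndices (target : Int) (coll : List Int) : List Int :=
  (PySem.List.enumerate coll 0).foldl
    (fun result p => if p.2 == target then result ++ [p.1] else result) []

def findPitches (pitch : Int) (coll : List Int) : List Int :=
  let diffs := coll.foldl (fun acc note => acc ++ [pitch - note]) []
  let absdiffs := diffs.foldl (fun acc diff => acc ++ [|diff|]) []
  match PySem.List.min? absdiffs (fun x => x) with
  | none => []            -- min([]) raises ValueError; excluded by Pre_findPitches
  | some mindiff => findIndices mindiff absdiffs

-- ===== PORT B =====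
def pitchStep (pitch : Int) (st : Option Int × List Int) (p : Int × Int) : Option Int × List Int :=
  let d := |pitch - p.2|
  match st.1 with
  | none => (some d, [p.1])
  | some b => if d < b then (some d, [p.1]) else if d == b then (some b, st.2 ++ [p.1]) else st

def findPitches_alt (pitch : Int) (coll : List Int) : List Int :=
  let st := (PySem.List.enumerate coll 0).foldl (pitchStep pitch) (none, [])
  st.2                    -- best = None (empty coll) raises ValueError; excluded by Pre_findPitches

-- ===== PRECONDITION & SPEC =====
-- Pre_ excludes the empty list, on which A's min([]) raises ValueError (B raises too).
def Pre_findPitches (pitch : Int) (coll : List Int) : Prop := coll ≠ []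
instance (pitch : Int) (coll : List Int) : Decidable (Pre_findPitches pitch coll) := by unfold Pre_findPitches; infer_instance
def pvWitness_findPitches : Int × List Int := (60, [59, 62, 61])

def Spec_findPitches (pitch : Int) (coll : List Int) (out : List Int) : Prop := out = findPitches_alt pitch coll
instance (pitch : Int) (coll : List Int) (out : List Int) : Decidable (Spec_findPitches pitch coll out) := by unfold Spec_findPitches; infer_instance

-- ===== CLAIM (what is proved, stated in full; the proofs are below) =====
def Claim_equal_findPitches : Prop := ∀ (pitch : Int) (coll : List Int), Dom_findPitches pitch coll → Pre_findPitches pitch coll → Spec_findPitches pitch coll (findPitches pitch coll)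

-- ===== LEMMAS AND PROOFS =====

-- indices (starting at i) of the elements of l equal to m
def sel (m : Int) (l : List Int) (i : Int) : List Int :=
  match l with
  | [] => []
  | x :: xs => if x = m then i :: sel m xs (i + 1) else sel m xs (i + 1)

lemma foldl_append_map (f : Int → Int) :
    ∀ (l acc : List Int), l.foldl (fun acc note => acc ++ [f note]) acc = acc ++ l.map f := by
  intro l
  induction l with
  | nil => simp
  | cons x xs ih => intro acc; simp [List.foldl, ih]

lemma findIndices_loop (target : Int) :
    ∀ (l : List Int) (i : Int) (res : List Int),
      (PySem.List.enumerate l i).foldl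
        (fun result p => if p.2 = target then result ++ [p.1] else result) res
      = res ++ sel target l i := by
  intro l
  induction l with
  | nil => simp [PySem.List.enumerate_nil, sel]
  | cons x xs ih =>
      intro i res
      simp only [PySem.List.enumerate_cons, List.foldl_cons, sel]
      by_cases h : x = target
      · simp [h, ih]
      · simp [h, ih]

lemma findIndices_eq (target : Int) (l : List Int) :
    findIndices target l = sel target l 0 := by
  unfold findIndices
  have : (fun (result : List Int) (p : Int × Int) =>
      if (p.2 == target) = true then result ++ [p.1] else result)
      = fun result p => if p.2 = target then result ++ [p.1] else result := by
    funext result p; simp [beq_iff_eq]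
  rw [this, findIndices_loop target l 0 []]
  simp

lemma foldl_min_le : ∀ (l : List Int) (a : Int), l.foldl min a ≤ a := by
  intro l
  induction l with
  | nil => simp
  | cons x xs ih =>
      intro a
      calc (x :: xs).foldl min a = xs.foldl min (min a x) := by simp [List.foldl]
        _ ≤ min a x := ih _
        _ ≤ a := min_le_left _ _

lemma loopB (pitch : Int) :
    ∀ (l : List Int) (b : Int) (res : List Int) (i : Int),
      (PySem.List.enumerate l i).foldl (pitchStep pitch) (some b, res)
      = (some ((l.map (fun n => |pitch - n|)).foldl min b),
         (if (l.map (fun n => |pitch - n|)).foldl min b = b then res else [])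
           ++ sel ((l.map (fun n => |pitch - n|)).foldl min b) (l.map (fun n => |pitch - n|)) i) := by
  intro l
  induction l with
  | nil => simp [PySem.List.enumerate_nil, sel]
  | cons x xs ih =>
      intro b res i
      rw [PySem.List.enumerate_cons, List.foldl_cons, List.map_cons, List.foldl_cons]
      by_cases hlt : |pitch - x| < b
      · have hstep : pitchStep pitch (some b, res) (i, x) = (some |pitch - x|, [i]) := by
          simp [pitchStep, hlt]
        rw [hstep, ih, min_eq_right hlt.le]
        have hle : (xs.map (fun n => |pitch - n|)).foldl min |pitch - x| ≤ |pitch - x| :=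
          foldl_min_le _ _
        have hne : ¬ ((xs.map (fun n => |pitch - n|)).foldl min |pitch - x| = b) := by omega
        rw [if_neg hne, List.nil_append, sel]
        by_cases he : |pitch - x| = (xs.map (fun n => |pitch - n|)).foldl min |pitch - x|
        · rw [if_pos he, if_pos he.symm, List.singleton_append]
        · rw [if_neg he, if_neg (fun h => he h.symm), List.nil_append]
      · by_cases heq : |pitch - x| = b
        · have hstep : pitchStep pitch (some b, res) (i, x) = (some b, res ++ [i]) := by
            simp [pitchStep, heq]
          rw [hstep, ih, min_eq_left (le_of_eq heq.symm)]
          have hle : (xs.map (fun n => |pitch - n|)).foldl min b ≤ b := foldl_min_le _ _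
          rw [sel]
          by_cases hmb : (xs.map (fun n => |pitch - n|)).foldl min b = b
          · rw [if_pos hmb, if_pos hmb, if_pos (heq.trans hmb.symm)]
            simp
          · have hdm : ¬ (|pitch - x| = (xs.map (fun n => |pitch - n|)).foldl min b) := by omega
            rw [if_neg hmb, if_neg hmb, if_neg hdm, List.nil_append]
        · have hgt : b < |pitch - x| := by omega
          have hstep : pitchStep pitch (some b, res) (i, x) = (some b, res) := by
            simp [pitchStep, hlt, heq]
          rw [hstep, ih, min_eq_left hgt.le]
          have hle : (xs.map (fun n => |pitch - n|)).foldl min b ≤ b := foldl_min_le _ _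
          have hdm : ¬ (|pitch - x| = (xs.map (fun n => |pitch - n|)).foldl min b) := by omega
          rw [sel, if_neg hdm]

-- ===== VERDICT (by name: the statement is the Claim_ definition above) =====
theorem findPitches_spec : Claim_equal_findPitches := by
  intro pitch coll _ hpre
  unfold Spec_findPitches findPitches findPitches_alt
  obtain ⟨c, cs, rfl⟩ : ∃ c cs, coll = c :: cs := by
    cases coll with
    | nil => exact absurd rfl hpre
    | cons c cs => exact ⟨c, cs, rfl⟩
  simp only [foldl_append_map (fun n => pitch - n), List.nil_append,
    foldl_append_map (fun d => |d|)]
  have hmap : (((c :: cs).map (fun n => pitch - n)).map (fun d => |d|))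
      = |pitch - c| :: cs.map (fun n => |pitch - n|) := by
    simp [List.map_map, Function.comp]
  rw [hmap, PySem.List.min?_id_cons]
  show findIndices ((cs.map (fun n => |pitch - n|)).foldl min |pitch - c|)
      (|pitch - c| :: cs.map (fun n => |pitch - n|)) = _
  rw [findIndices_eq]
  rw [PySem.List.enumerate_cons, List.foldl_cons]
  have hstep : pitchStep pitch ((none : Option Int), ([] : List Int)) (0, c)
      = (some |pitch - c|, [0]) := by
    simp [pitchStep]
  rw [hstep, loopB pitch cs |pitch - c| [0] (0 + 1), sel]
  by_cases he : (cs.map (fun n => |pitch - n|)).foldl min |pitch - c| = |pitch - c|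
  · rw [if_pos he, if_pos (he.symm ▸ rfl : |pitch - c| = (cs.map (fun n => |pitch - n|)).foldl min |pitch - c|)]
    simp
  · rw [if_neg he, if_neg (fun h => he h.symm), List.nil_append]
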